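-- pv_equiv track=rewrite | github.com/BillHWChen/python-practice | boundedSquareSum.py | boundedSquareSum
-- ===== SOURCE A (Python) =====
-- import bisect
--
-- def boundedSquareSum(a, b, lower, upper):
--    a = [n**2 for n in a]
--    b = [n**2 for n in b]
--
--    shorter, longer = [a, b] if len(a) < len(b) else [b, a]
--    shorter = sorted(shorter)
--
--    num_pairs = 0
--    for numA in longer:
--       # The index of the smallest element that is >= lower - numA
--       min_idx = bisect.bisect_left(shorter, lower - numA)
--       # The index of the largest element that is <= upper - numA
--       max_idx = bisect.bisect_right(shorter, upper - numA)
--       # All values between these indices are valid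
--       num_pairs += max(max_idx - min_idx, 0)
--
--    return num_pairs
-- ===== SOURCE B (Python) =====
-- def boundedSquareSum(a, b, lower, upper):
--     count = 0
--     for x in a:
--         sx = x * x
--         for y in b:
--             if lower <= sx + y * y <= upper:
--                 count += 1
--     return count
-- ===== Notes on version B (the rewrite author's own statement) =====
-- stated objective: simpler
-- what changed: Replaced the sort-the-shorter-squared-list-and-bisect counting with a plain nested double loop that tests lower <= x*x + y*y <= upper for every cross pair.
import Mathlib
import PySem

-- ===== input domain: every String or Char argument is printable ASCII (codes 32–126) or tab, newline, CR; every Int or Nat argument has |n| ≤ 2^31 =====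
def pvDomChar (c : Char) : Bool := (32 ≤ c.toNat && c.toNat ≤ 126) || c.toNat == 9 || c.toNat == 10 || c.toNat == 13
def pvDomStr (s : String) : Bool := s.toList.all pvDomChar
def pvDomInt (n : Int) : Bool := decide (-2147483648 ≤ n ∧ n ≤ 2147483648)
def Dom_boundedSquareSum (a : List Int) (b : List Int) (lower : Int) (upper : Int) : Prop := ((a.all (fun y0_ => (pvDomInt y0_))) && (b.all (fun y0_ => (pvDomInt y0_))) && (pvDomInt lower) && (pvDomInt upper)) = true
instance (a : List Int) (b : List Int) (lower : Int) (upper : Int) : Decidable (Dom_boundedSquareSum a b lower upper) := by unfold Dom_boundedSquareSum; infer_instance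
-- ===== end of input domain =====

-- B replaces A's sort-the-shorter-squared-list + bisect counting with a plain nested
-- double loop over a and b testing lower <= x*x + y*y <= upper (simpler, not faster).


-- ===== PORT A =====
-- bisect.bisect_left / bisect.bisect_right are the PySem library primitives.
def boundedSquareSum (a : List Int) (b : List Int) (lower : Int) (upper : Int) : Int :=
  let a2 := a.map (fun n => n ^ 2)
  let b2 := b.map (fun n => n ^ 2)
  let p := if a2.length < b2.length then (a2, b2) else (b2, a2)
  let shorter := PySem.List.sorted p.1 (fun x => x)
  let longer := p.2
  longer.foldl (fun num_pairs numA =>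
    let min_idx := PySem.List.bisectLeft shorter (lower - numA)
    let max_idx := PySem.List.bisectRight shorter (upper - numA)
    num_pairs + max ((max_idx : Int) - (min_idx : Int)) 0) 0

-- ===== PORT B =====
def boundedSquareSum_alt (a : List Int) (b : List Int) (lower : Int) (upper : Int) : Int :=
  a.foldl (fun count x =>
    let sx := x * x
    b.foldl (fun count y =>
      if lower ≤ sx + y * y ∧ sx + y * y ≤ upper then count + 1 else count) count) 0

-- ===== PRECONDITION & SPEC =====
def Spec_boundedSquareSum (a : List Int) (b : List Int) (lower : Int) (upper : Int) (out : Int) : Prop := out = boundedSquareSum_alt a b lower upper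
instance (a : List Int) (b : List Int) (lower : Int) (upper : Int) (out : Int) : Decidable (Spec_boundedSquareSum a b lower upper out) := by unfold Spec_boundedSquareSum; infer_instance

-- ===== CLAIM (what is proved, stated in full; the proofs are below) =====
def Claim_equal_boundedSquareSum : Prop := ∀ (a : List Int) (b : List Int) (lower : Int) (upper : Int), Dom_boundedSquareSum a b lower upper → Spec_boundedSquareSum a b lower upper (boundedSquareSum a b lower upper)

-- ===== LEMMAS AND PROOFS =====

-- the cross-pair count, outer list first: Σ_{x∈X} #{y∈Y | l ≤ x² + y² ≤ u}
def pairCount (X Y : List Int) (l u : Int) : Int :=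
  (X.map (fun x => ((Y.countP (fun y => decide (l ≤ x * x + y * y ∧ x * x + y * y ≤ u)) : Nat) : Int))).sum

-- a count determined by an index split: all indices below k satisfy p, all above fail it
theorem countP_of_index_split (s : List Int) (p : Int → Bool) (k : Nat) (hk : k ≤ s.length)
    (h1 : ∀ j (hj : j < s.length), j < k → p s[j])
    (h2 : ∀ j (hj : j < s.length), k ≤ j → ¬ p s[j] = true) :
    s.countP p = k := by
  have hsplit : s = s.take k ++ s.drop k := (List.take_append_drop k s).symm
  rw [hsplit, List.countP_append]
  have htake : (s.take k).countP p = (s.take k).length := by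
    apply List.countP_eq_length.mpr
    intro x hx
    obtain ⟨i, hi, rfl⟩ := List.mem_iff_getElem.mp hx
    have hi' : i < s.length := lt_of_lt_of_le (lt_of_lt_of_le hi (by simp)) (le_refl _)
    rw [List.getElem_take]
    exact h1 i (by omega) (by simp at hi; omega)
  have hdrop : (s.drop k).countP p = 0 := by
    apply List.countP_eq_zero.mpr
    intro x hx
    obtain ⟨i, hi, rfl⟩ := List.mem_iff_getElem.mp hx
    rw [List.getElem_drop]
    exact h2 (k + i) (by simp at hi; omega) (by omega)
  rw [htake, hdrop, List.length_take]
  omega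

theorem bisectLeft_eq_countP (s : List Int) (x : Int)
    (hs : List.Pairwise (fun a b => a ≤ b) s) :
    PySem.List.bisectLeft s x = s.countP (fun v => decide (v < x)) := by
  obtain ⟨hle, h1, h2⟩ := PySem.List.bisectLeft_spec s x hs
  exact (countP_of_index_split s _ _ hle
    (fun j hj hjk => by simpa using h1 j hj hjk)
    (fun j hj hkj => by simpa using not_lt.mpr (h2 j hj hkj))).symm

theorem bisectRight_eq_countP (s : List Int) (x : Int)
    (hs : List.Pairwise (fun a b => a ≤ b) s) :
    PySem.List.bisectRight s x = s.countP (fun v => decide (v ≤ x)) := by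
  obtain ⟨hle, h1, h2⟩ := PySem.List.bisectRight_spec s x hs
  exact (countP_of_index_split s _ _ hle
    (fun j hj hjk => by simpa using h1 j hj hjk)
    (fun j hj hkj => by simpa using not_le.mpr (h2 j hj hkj))).symm

-- the bisect difference, clamped at 0, is exactly the in-range count
theorem maxdiff_eq_range_count (s : List Int) (l u : Int) :
    max ((s.countP (fun v => decide (v ≤ u)) : Int) - (s.countP (fun v => decide (v < l)) : Int)) 0
      = (s.countP (fun v => decide (l ≤ v ∧ v ≤ u)) : Int) := by
  by_cases h : l ≤ u
  · have key : s.countP (fun v => decide (v ≤ u))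
        = s.countP (fun v => decide (v < l)) + s.countP (fun v => decide (l ≤ v ∧ v ≤ u)) := by
      induction s with
      | nil => simp
      | cons v t ih =>
        simp only [List.countP_cons, decide_eq_true_eq]
        split_ifs <;> omega
    rw [key]; push_cast; omega
  · have h0 : s.countP (fun v => decide (l ≤ v ∧ v ≤ u)) = 0 :=
      List.countP_eq_zero.mpr (fun v _ => by simp; omega)
    have hle : s.countP (fun v => decide (v ≤ u)) ≤ s.countP (fun v => decide (v < l)) :=
      List.countP_mono_left (fun v _ hv => by simp at hv ⊢; omega)
    rw [h0]
    simp only [Nat.cast_zero]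
    omega

-- the cross-pair count is symmetric (Fubini for counting)
theorem pairCount_comm (X Y : List Int) (l u : Int) : pairCount X Y l u = pairCount Y X l u := by
  induction X with
  | nil => simp [pairCount]
  | cons x t ih =>
    simp only [pairCount, List.map_cons, List.sum_cons] at *
    rw [ih]
    have step : ∀ y : Int,
        ((List.countP (fun x' => decide (l ≤ y * y + x' * x' ∧ y * y + x' * x' ≤ u)) (x :: t) : Nat) : Int)
        = ((List.countP (fun x' => decide (l ≤ y * y + x' * x' ∧ y * y + x' * x' ≤ u)) t : Nat) : Int)
          + (if decide (l ≤ x * x + y * y ∧ x * x + y * y ≤ u) = true then (1 : Int) else 0) := by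
      intro y
      rw [List.countP_cons]
      push_cast
      congr 1
      have : (l ≤ y * y + x * x ∧ y * y + x * x ≤ u) = (l ≤ x * x + y * y ∧ x * x + y * y ≤ u) := by
        rw [Int.mul_comm] at *; ring_nf
      split_ifs with h1 h2 h2 <;> simp_all
    calc ((Y.countP (fun y => decide (l ≤ x * x + y * y ∧ x * x + y * y ≤ u)) : Nat) : Int)
          + (Y.map (fun y => ((List.countP (fun x' => decide (l ≤ y * y + x' * x' ∧ y * y + x' * x' ≤ u)) t : Nat) : Int))).sum
        = (Y.map (fun y => ((List.countP (fun x' => decide (l ≤ y * y + x' * x' ∧ y * y + x' * x' ≤ u)) t : Nat) : Int)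
            + (if decide (l ≤ x * x + y * y ∧ x * x + y * y ≤ u) = true then (1 : Int) else 0))).sum := by
          rw [PySem.List.sum_map_add_int]
          rw [PySem.List.sum_map_ite_one_zero]
          omega
      _ = (Y.map (fun y => ((List.countP (fun x' => decide (l ≤ y * y + x' * x' ∧ y * y + x' * x' ≤ u)) (x :: t) : Nat) : Int))).sum := by
          apply congrArg
          apply List.map_congr_left
          intro y _
          rw [step y]

-- port A computes pairCount with the longer original list outside
theorem portA_eq_pairCount (X Y : List Int) (l u : Int) :
    (X.map (fun n => n ^ 2)).foldl (fun num_pairs numA =>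
      num_pairs + max ((PySem.List.bisectRight (PySem.List.sorted (Y.map (fun n => n ^ 2)) (fun x => x)) (u - numA) : Int)
        - (PySem.List.bisectLeft (PySem.List.sorted (Y.map (fun n => n ^ 2)) (fun x => x)) (l - numA) : Int)) 0) 0
      = pairCount X Y l u := by
  set S := PySem.List.sorted (Y.map (fun n => n ^ 2)) (fun x => x) with hS
  have hpw : List.Pairwise (fun a b => a ≤ b) S := by
    simpa using PySem.List.sorted_pairwise (Y.map (fun n => n ^ 2)) (fun x => x)
  have hperm : S.Perm (Y.map (fun n => n ^ 2)) := PySem.List.sorted_perm _ _ false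
  rw [PySem.List.foldl_add]
  simp only [zero_add, pairCount]
  rw [List.map_map]
  apply congrArg
  apply List.map_congr_left
  intro x _
  simp only [Function.comp_apply]
  rw [bisectRight_eq_countP S _ hpw, bisectLeft_eq_countP S _ hpw,
      hperm.countP_eq, hperm.countP_eq,
      maxdiff_eq_range_count (Y.map (fun n => n ^ 2)) (l - x ^ 2) (u - x ^ 2),
      List.countP_map]
  congr 1
  apply List.countP_congr
  intro y _
  simp only [Function.comp_apply, decide_eq_true_eq]
  constructor <;> intro h <;> constructor <;> nlinarith [h.1, h.2, sq_nonneg x, sq_nonneg y]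

-- a foldl whose step adds a per-element amount is the sum of those amounts
theorem foldl_shift (f : Int → Int → Int) (g : Int → Int) (h : ∀ c x, f c x = c + g x) :
    ∀ (L : List Int) (c : Int), L.foldl f c = c + (L.map g).sum := by
  intro L
  induction L with
  | nil => simp
  | cons x t ih => intro c; simp only [List.foldl_cons, List.map_cons, List.sum_cons, h]; rw [ih]; ring

-- port B computes pairCount with a outside
theorem portB_eq_pairCount (a b : List Int) (l u : Int) :
    boundedSquareSum_alt a b l u = pairCount a b l u := by
  unfold boundedSquareSum_alt pairCount
  have inner : ∀ (x c : Int),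
      b.foldl (fun count y => if l ≤ x * x + y * y ∧ x * x + y * y ≤ u then count + 1 else count) c
        = c + ((b.countP (fun y => decide (l ≤ x * x + y * y ∧ x * x + y * y ≤ u)) : Nat) : Int) := by
    intro x c
    induction b generalizing c with
    | nil => simp
    | cons y t ih =>
      simp only [List.foldl_cons, List.countP_cons]
      by_cases h : l ≤ x * x + y * y ∧ x * x + y * y ≤ u
      · have hd : decide (l ≤ x * x + y * y ∧ x * x + y * y ≤ u) = true := by simpa using h
        rw [if_pos h, ih]
        simp only [hd, if_true]
        push_cast; omega
      · rw [if_neg h, ih]; simp [h]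
  rw [foldl_shift _ _ (fun c x => inner x c), zero_add]

-- ===== VERDICT (by name: the statement is the Claim_ definition above) =====
theorem boundedSquareSum_spec : Claim_equal_boundedSquareSum := by
  intro a b lower upper _
  unfold Spec_boundedSquareSum
  rw [portB_eq_pairCount]
  unfold boundedSquareSum
  simp only [List.length_map]
  by_cases h : a.length < b.length
  · simp only [h, if_pos]
    rw [portA_eq_pairCount b a lower upper, pairCount_comm]
  · rw [if_neg h]
    exact (portA_eq_pairCount a b lower upper)
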